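-- pv_equiv track=rewrite | github.com/Pengppi/algorithm-practice | leetcode/src/main/python/leetcode/editor/cn/K镜像数字的和sumOfKMirrorNumbers.py | is_k_mirror
-- ===== SOURCE A (Python) =====
-- def is_k_mirror(x: int, k: int) -> bool:
--     if x % k == 0:
--         return False
--     mask = 0
--     while mask < x // k:
--         mask = mask * k + x % k
--         x //= k
--     return mask == x or mask == x // k
-- ===== SOURCE B (Python) =====
-- def _digits(x, k):
--     # base-k digit list of x, least significant first (x > 0, k >= 2 at every call)
--     if x == 0:
--         return []
--     return [x % k] + _digits(x // k, k)
--
--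
-- def is_k_mirror(x: int, k: int) -> bool:
--     if x % k == 0 or x < 0 or k < 0:
--         return False
--     ds = _digits(x, k)
--     return ds == ds[::-1]
-- ===== Notes on version B (the rewrite author's own statement) =====
-- stated objective: simpler
-- what changed: B recursively builds the full base-k digit list of x and returns whether that list equals its reverse, replacing A's in-place half-reversal loop with its mask==x or mask==x//k odd/even test.
-- outside the precondition, e.g. on is_k_mirror(-5, -2): A returns True, B returns False; on is_k_mirror(5, 0): A raises ZeroDivisionError, B raises ZeroDivisionError
import Mathlib
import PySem

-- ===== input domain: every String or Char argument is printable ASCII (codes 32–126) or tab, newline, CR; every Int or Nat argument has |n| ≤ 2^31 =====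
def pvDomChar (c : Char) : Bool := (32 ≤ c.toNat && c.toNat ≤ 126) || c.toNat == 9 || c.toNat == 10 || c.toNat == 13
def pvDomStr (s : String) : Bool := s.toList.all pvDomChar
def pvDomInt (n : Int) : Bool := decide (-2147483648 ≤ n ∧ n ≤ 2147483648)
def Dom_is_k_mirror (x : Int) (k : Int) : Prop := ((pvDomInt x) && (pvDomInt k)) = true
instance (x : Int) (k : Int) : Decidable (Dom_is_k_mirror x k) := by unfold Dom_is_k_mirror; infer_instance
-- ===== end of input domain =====

-- B rejects negatives up front, recursively builds the full base-k digit list of x and compares it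
-- with its reverse, replacing A's in-place half-reversal with its `mask == x or mask == x // k` test.

-- ===== PORT A =====
-- the `while mask < x // k` loop; fuel bounds the iteration count (the loop runs at most x times), guard order preserved
def pvALoop (k : Int) : Nat → Int → Int → Int × Int
  | 0, mask, x => (mask, x)
  | fuel + 1, mask, x =>
    if mask < PySem.Int.floordiv x k then
      pvALoop k fuel (mask * k + PySem.Int.mod x k) (PySem.Int.floordiv x k)
    else (mask, x)

def is_k_mirror (x : Int) (k : Int) : Bool :=
  if PySem.Int.mod x k = 0 then false
  else
    let r := pvALoop k (x.natAbs + 1) 0 x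
    decide (r.1 = r.2) || decide (r.1 = PySem.Int.floordiv r.2 k)

-- ===== PORT B =====
-- Source B's recursive `_digits`: base-k digit list, least significant first; fuel bounds the depth
def pvDigits (k : Int) : Nat → Int → List Int
  | 0, _ => []
  | fuel + 1, x =>
    if x = 0 then []
    else PySem.Int.mod x k :: pvDigits k fuel (PySem.Int.floordiv x k)

def is_k_mirror_alt (x : Int) (k : Int) : Bool :=
  if PySem.Int.mod x k = 0 ∨ x < 0 ∨ k < 0 then false
  else
    let ds := pvDigits k (x.natAbs + 1) x
    decide (ds = ds.reverse)

-- ===== PRECONDITION & SPEC =====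
-- Pre_ excludes k = 0, where A raises ZeroDivisionError, and negative k paired with negative x, where
-- A's value is an accident of floor-division signs (e.g. A(-5,-2) = True) rather than any palindrome reading.
def Pre_is_k_mirror (x : Int) (k : Int) : Prop := 1 ≤ k ∨ (k ≤ -1 ∧ 0 ≤ x)
instance (x : Int) (k : Int) : Decidable (Pre_is_k_mirror x k) := by unfold Pre_is_k_mirror; infer_instance
def pvWitness_is_k_mirror : Int × Int := (9, 2)

def Spec_is_k_mirror (x : Int) (k : Int) (out : Bool) : Prop := out = is_k_mirror_alt x k
instance (x : Int) (k : Int) (out : Bool) : Decidable (Spec_is_k_mirror x k out) := by unfold Spec_is_k_mirror; infer_instance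

-- ===== CLAIM (what is proved, stated in full; the proofs are below) =====
def Claim_equal_is_k_mirror : Prop := ∀ (x : Int) (k : Int), Dom_is_k_mirror x k → Pre_is_k_mirror x k → Spec_is_k_mirror x k (is_k_mirror x k)

-- ===== LEMMAS AND PROOFS =====

-- value of the first i digits reversed (A's `mask` after i iterations) and of the digits from i on (A's `x`)
def pvMval (K : Nat) (D : List Nat) (i : Nat) : Nat := Nat.ofDigits K ((D.take i).reverse)
def pvXval (K : Nat) (D : List Nat) (i : Nat) : Nat := Nat.ofDigits K (D.drop i)

lemma pvXval_mod (K : Nat) (D : List Nat) (i : Nat) (hD : ∀ d ∈ D, d < K) (hi : i < D.length) :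
    pvXval K D i % K = D[i] := by
  rw [pvXval, List.drop_eq_getElem_cons hi, Nat.ofDigits_cons]
  simp [Nat.add_mul_mod_self_left, Nat.mod_eq_of_lt (hD _ (List.getElem_mem hi))]

lemma pvXval_div (K : Nat) (D : List Nat) (i : Nat) (hK : 1 < K) (hD : ∀ d ∈ D, d < K) (hi : i < D.length) :
    pvXval K D i / K = pvXval K D (i + 1) := by
  rw [pvXval, List.drop_eq_getElem_cons hi, Nat.ofDigits_cons,
    Nat.add_mul_div_left _ _ (by omega : 0 < K), Nat.div_eq_of_lt (hD _ (List.getElem_mem hi))]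
  simp [pvXval]

lemma pvMval_step (K : Nat) (D : List Nat) (i : Nat) (hi : i < D.length) :
    pvMval K D i * K + D[i] = pvMval K D (i + 1) := by
  rw [pvMval, pvMval, List.take_succ_eq_append_getElem hi, List.reverse_append,
    List.reverse_singleton, List.singleton_append, Nat.ofDigits_cons]
  ring

lemma pvALoop_run (K : Nat) (D : List Nat) (hK : 1 < K) (hD : ∀ d ∈ D, d < K) :
    ∀ (fuel i s : Nat), i ≤ s → s ≤ D.length → s - i < fuel →
    (∀ j, i ≤ j → j < s → pvMval K D j < pvXval K D j / K) →
    ¬ (pvMval K D s < pvXval K D s / K) →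
    pvALoop (K : Int) fuel ((pvMval K D i : Nat) : Int) ((pvXval K D i : Nat) : Int)
      = (((pvMval K D s : Nat) : Int), ((pvXval K D s : Nat) : Int)) := by
  intro fuel
  induction fuel with
  | zero => intro i s his _ hf _ _; omega
  | succ f ih =>
    intro i s his hsn hf hguard hstop
    simp only [pvALoop, PySem.Int.floordiv_natCast, PySem.Int.mod_natCast]
    by_cases heq : i = s
    · subst heq
      rw [if_neg (by exact_mod_cast hstop)]
    · have hlt : i < s := lt_of_le_of_ne his heq
      have hiD : i < D.length := lt_of_lt_of_le hlt hsn
      rw [if_pos (by exact_mod_cast hguard i le_rfl hlt)]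
      have h1 : ((pvMval K D i : Nat) : Int) * (K : Int) + ((pvXval K D i % K : Nat) : Int)
          = ((pvMval K D (i + 1) : Nat) : Int) := by
        rw [pvXval_mod K D i hD hiD]
        push_cast [← pvMval_step K D i hiD]
        ring
      rw [h1, pvXval_div K D i hK hD hiD]
      exact ih (i + 1) s hlt hsn (by omega)
        (fun j hj hjs => hguard j (by omega) hjs) hstop

lemma pvDigits_eq (K : Nat) (hK : 1 < K) :
    ∀ (fuel X : Nat), X < fuel →
    pvDigits (K : Int) fuel (X : Int) = (Nat.digits K X).map (fun d : Nat => (d : Int)) := by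
  intro fuel
  induction fuel with
  | zero => intro X h; omega
  | succ f ih =>
    intro X h
    by_cases h0 : X = 0
    · subst h0; simp [pvDigits]
    · simp only [pvDigits, PySem.Int.floordiv_natCast, PySem.Int.mod_natCast]
      rw [if_neg (by exact_mod_cast h0)]
      rw [ih (X / K) (lt_of_lt_of_le (Nat.div_lt_self (by omega) hK) (by omega))]
      rw [Nat.digits_def' hK (Nat.pos_of_ne_zero h0)]
      simp

lemma pvOfDigits_lower (K : Nat) :
    ∀ (L : List Nat) (h : L ≠ []), L.getLast h ≠ 0 → K ^ (L.length - 1) ≤ Nat.ofDigits K L := by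
  intro L
  induction L with
  | nil => intro h; exact absurd rfl h
  | cons a tl ih =>
    intro h hlast
    cases tl with
    | nil =>
      simp only [List.getLast_singleton] at hlast
      simpa [Nat.ofDigits_cons, Nat.ofDigits_nil] using Nat.one_le_iff_ne_zero.mpr hlast
    | cons b tl' =>
      have hlast' : (b :: tl').getLast (by simp) ≠ 0 := by
        rwa [List.getLast_cons (by simp)] at hlast
      have := ih (by simp) hlast'
      have hlen : (a :: b :: tl').length - 1 = (b :: tl').length := by simp
      rw [hlen, Nat.ofDigits_cons]
      calc K ^ (b :: tl').length = K * K ^ ((b :: tl').length - 1) := by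
            rw [← pow_succ', Nat.sub_add_cancel (by simp)]
        _ ≤ K * Nat.ofDigits K (b :: tl') := Nat.mul_le_mul_left K this
        _ ≤ a + K * Nat.ofDigits K (b :: tl') := Nat.le_add_left _ _

lemma pvOfDigits_inj_iff (K : Nat) (hK : 1 < K) (L1 L2 : List Nat)
    (h1 : ∀ d ∈ L1, d < K) (h2 : ∀ d ∈ L2, d < K)
    (g1 : ∀ h : L1 ≠ [], L1.getLast h ≠ 0) (g2 : ∀ h : L2 ≠ [], L2.getLast h ≠ 0) :
    Nat.ofDigits K L1 = Nat.ofDigits K L2 ↔ L1 = L2 := by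
  constructor
  · intro h
    rw [← Nat.digits_ofDigits K hK L1 h1 g1, ← Nat.digits_ofDigits K hK L2 h2 g2, h]
  · intro h; rw [h]

lemma pvPal_even {α : Type} (L : List α) (m : Nat) (h : L.length = 2 * m) :
    (L = L.reverse) ↔ (L.take m).reverse = L.drop m := by
  constructor
  · intro hp
    rw [List.reverse_take, ← hp, h, (by omega : 2 * m - m = m)]
  · intro ht
    have hrev : L.reverse = (L.drop m).reverse ++ (L.take m).reverse := by
      rw [← List.reverse_append, List.take_append_drop]
    rw [hrev, ← ht, List.reverse_reverse, ht]
    exact (List.take_append_drop m L).symm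

lemma pvPal_odd {α : Type} (L : List α) (m : Nat) (h : L.length = 2 * m + 1) :
    (L = L.reverse) ↔ (L.take m).reverse = L.drop (m + 1) := by
  have hm : m < L.length := by omega
  constructor
  · intro hp
    rw [List.reverse_take, ← hp, h, (by omega : 2 * m + 1 - m = m + 1)]
  · intro ht
    have hd : L.drop m = L[m] :: L.drop (m + 1) := List.drop_eq_getElem_cons hm
    have hrev : L.reverse = (L.drop m).reverse ++ (L.take m).reverse := by
      rw [← List.reverse_append, List.take_append_drop]
    rw [hrev, hd, List.reverse_cons, ← ht, List.reverse_reverse, ht,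
      ← List.take_succ_eq_append_getElem hm]
    exact (List.take_append_drop (m + 1) L).symm

lemma pvMval_lt (K : Nat) (hK : 1 < K) (D : List Nat) (hD : ∀ d ∈ D, d < K) (i : Nat)
    (hi : i ≤ D.length) : pvMval K D i < K ^ i := by
  have h := Nat.ofDigits_lt_base_pow_length hK
    (l := (D.take i).reverse) (fun x hx => hD x (List.take_subset i D (List.mem_reverse.mp hx)))
  rwa [List.length_reverse, List.length_take, Nat.min_eq_left hi] at h

lemma pvXval_lt (K : Nat) (hK : 1 < K) (D : List Nat) (hD : ∀ d ∈ D, d < K) (i : Nat) :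
    pvXval K D i < K ^ (D.length - i) := by
  have h := Nat.ofDigits_lt_base_pow_length hK
    (l := D.drop i) (fun x hx => hD x (List.drop_subset i D hx))
  rwa [List.length_drop] at h

lemma pvMval_ge (K : Nat) (D : List Nat) (hne : D ≠ []) (hhead : D.head hne ≠ 0)
    (i : Nat) (h1 : 1 ≤ i) (hi : i ≤ D.length) : K ^ (i - 1) ≤ pvMval K D i := by
  have hlen : ((D.take i).reverse).length = i := by
    rw [List.length_reverse, List.length_take, Nat.min_eq_left hi]
  have hne' : (D.take i).reverse ≠ [] := by
    intro h; rw [h] at hlen; simp at hlen; omega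
  have hne'' : D.take i ≠ [] := by
    intro h; apply hne'; rw [h]; rfl
  have hlast' : ((D.take i).reverse).getLast hne' ≠ 0 := by
    rw [List.getLast_reverse (l := D.take i)]
    rwa [List.head_take]
  have h := pvOfDigits_lower K ((D.take i).reverse) hne' hlast'
  rwa [hlen] at h

lemma pvXval_ge (K : Nat) (D : List Nat) (hne : D ≠ []) (hlast : D.getLast hne ≠ 0)
    (i : Nat) (hi : i < D.length) : K ^ (D.length - i - 1) ≤ pvXval K D i := by
  have hlen : (D.drop i).length = D.length - i := List.length_drop
  have hne' : D.drop i ≠ [] := by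
    intro h; rw [h] at hlen; simp at hlen; omega
  have hlast' : (D.drop i).getLast hne' ≠ 0 := by
    rw [List.getLast_drop]; exact hlast
  have h := pvOfDigits_lower K (D.drop i) hne' hlast'
  rwa [hlen] at h

lemma pvXval_zero (K : Nat) (D : List Nat) (i : Nat) (hi : D.length ≤ i) : pvXval K D i = 0 := by
  simp [pvXval, List.drop_eq_nil_of_le hi, Nat.ofDigits_nil]

-- everything about the positive-x, k ≥ 2 case
lemma pvMain_pos (K X : Nat) (hK : 2 ≤ K) (hX : 0 < X) (hmod : X % K ≠ 0) :
    is_k_mirror (X : Int) (K : Int) = is_k_mirror_alt (X : Int) (K : Int) := by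
  have hK1 : 1 < K := hK
  have hDlt : ∀ d ∈ Nat.digits K X, d < K := fun d hd => Nat.digits_lt_base hK1 hd
  have hne : Nat.digits K X ≠ [] := Nat.digits_ne_nil_iff_ne_zero.mpr (by omega)
  have hhead : (Nat.digits K X).head hne ≠ 0 := by
    have hcons : Nat.digits K X = X % K :: Nat.digits K (X / K) := Nat.digits_def' hK1 hX
    simp only [hcons, List.head_cons]
    exact hmod
  have hlast : (Nat.digits K X).getLast hne ≠ 0 := Nat.getLast_digit_ne_zero K (by omega)
  have hn1 : 1 ≤ (Nat.digits K X).length := List.length_pos_of_ne_nil hne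
  have hx0 : pvXval K (Nat.digits K X) 0 = X := by
    simp only [pvXval, List.drop_zero]; exact Nat.ofDigits_digits K X
  have hm0 : pvMval K (Nat.digits K X) 0 = 0 := by
    simp [pvMval, Nat.ofDigits_nil]
  have hnX : (Nat.digits K X).length ≤ X := by
    have h1 : K ^ ((Nat.digits K X).length - 1) ≤ X := by
      have := pvXval_ge K (Nat.digits K X) hne hlast 0 (by omega)
      rwa [hx0, Nat.sub_zero] at this
    have h2 : (Nat.digits K X).length - 1 < 2 ^ ((Nat.digits K X).length - 1) :=
      Nat.lt_two_pow_self
    have h3 : 2 ^ ((Nat.digits K X).length - 1) ≤ K ^ ((Nat.digits K X).length - 1) :=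
      Nat.pow_le_pow_left hK _
    omega
  have hguard : ∀ j, j + 1 + j + 1 ≤ (Nat.digits K X).length →
      pvMval K (Nat.digits K X) j < pvXval K (Nat.digits K X) j / K := by
    intro j hj
    rw [pvXval_div K (Nat.digits K X) j hK1 hDlt (by omega)]
    calc pvMval K (Nat.digits K X) j < K ^ j :=
          pvMval_lt K hK1 (Nat.digits K X) hDlt j (by omega)
      _ ≤ K ^ ((Nat.digits K X).length - (j + 1) - 1) := Nat.pow_le_pow_right (by omega) (by omega)
      _ ≤ pvXval K (Nat.digits K X) (j + 1) :=
          pvXval_ge K (Nat.digits K X) hne hlast (j + 1) (by omega)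
  have hgTake : ∀ i : Nat, ∀ h : ((Nat.digits K X).take i).reverse ≠ [],
      (((Nat.digits K X).take i).reverse).getLast h ≠ 0 := by
    intro i h
    rw [List.getLast_reverse (l := (Nat.digits K X).take i)]
    rwa [List.head_take]
  have hgDrop : ∀ i : Nat, ∀ h : (Nat.digits K X).drop i ≠ [],
      ((Nat.digits K X).drop i).getLast h ≠ 0 := by
    intro i h
    rw [List.getLast_drop]; exact hlast
  have hmemTake : ∀ i : Nat, ∀ d ∈ ((Nat.digits K X).take i).reverse, d < K :=
    fun i d hd => hDlt d (List.take_subset i _ (List.mem_reverse.mp hd))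
  have hmemDrop : ∀ i : Nat, ∀ d ∈ (Nat.digits K X).drop i, d < K :=
    fun i d hd => hDlt d (List.drop_subset i _ hd)
  -- evaluate B once and for all
  have hB : is_k_mirror_alt (X : Int) (K : Int)
      = decide (Nat.digits K X = (Nat.digits K X).reverse) := by
    simp only [is_k_mirror_alt, PySem.Int.mod_natCast, Int.natAbs_natCast]
    rw [if_neg (by push_cast; omega)]
    simp only [pvDigits_eq K hK1 (X + 1) X (by omega)]
    apply decide_eq_decide.mpr
    rw [← List.map_reverse]
    exact (List.map_injective_iff.mpr (fun a b hab => by exact_mod_cast hab)).eq_iff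
  obtain ⟨m, hpar⟩ := Nat.even_or_odd' (Nat.digits K X).length
  rcases hpar with heven | hodd
  · -- even length 2*m
    have hm1 : 1 ≤ m := by omega
    have hstop : ¬ (pvMval K (Nat.digits K X) m < pvXval K (Nat.digits K X) m / K) := by
      rw [pvXval_div K (Nat.digits K X) m hK1 hDlt (by omega)]
      apply not_lt.mpr
      apply le_of_lt
      calc pvXval K (Nat.digits K X) (m + 1) < K ^ ((Nat.digits K X).length - (m + 1)) :=
            pvXval_lt K hK1 (Nat.digits K X) hDlt (m + 1)
        _ = K ^ (m - 1) := by congr 1; omega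
        _ ≤ pvMval K (Nat.digits K X) m :=
            pvMval_ge K (Nat.digits K X) hne hhead m hm1 (by omega)
    have hrun := pvALoop_run K (Nat.digits K X) hK1 hDlt (X + 1) 0 m (by omega) (by omega)
      (by omega) (fun j _ hj => hguard j (by omega)) hstop
    rw [hm0, hx0] at hrun
    simp only [is_k_mirror, PySem.Int.mod_natCast, Int.natAbs_natCast]
    rw [if_neg (by exact_mod_cast hmod)]
    simp only [Nat.cast_zero] at hrun
    simp only [hrun]
    rw [hB]
    simp only [PySem.Int.floordiv_natCast]
    rw [pvXval_div K (Nat.digits K X) m hK1 hDlt (by omega)]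
    have hne2 : pvMval K (Nat.digits K X) m ≠ pvXval K (Nat.digits K X) (m + 1) := by
      apply ne_of_gt
      calc pvXval K (Nat.digits K X) (m + 1) < K ^ ((Nat.digits K X).length - (m + 1)) :=
            pvXval_lt K hK1 (Nat.digits K X) hDlt (m + 1)
        _ = K ^ (m - 1) := by congr 1; omega
        _ ≤ pvMval K (Nat.digits K X) m :=
            pvMval_ge K (Nat.digits K X) hne hhead m hm1 (by omega)
    have hd2 : decide (((pvMval K (Nat.digits K X) m : Nat) : Int)
        = ((pvXval K (Nat.digits K X) (m + 1) : Nat) : Int)) = false := by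
      simp [hne2]
    rw [hd2, Bool.or_false]
    apply decide_eq_decide.mpr
    rw [Nat.cast_inj (R := Int)]
    unfold pvMval pvXval
    rw [pvOfDigits_inj_iff K hK1 _ _ (hmemTake m) (hmemDrop m) (hgTake m) (hgDrop m),
      pvPal_even (Nat.digits K X) m heven]
  · -- odd length 2*m + 1
    by_cases hc : pvMval K (Nat.digits K X) m < pvXval K (Nat.digits K X) (m + 1)
    · -- one extra iteration; A is false and the list is not a palindrome
      have hm1 : 1 ≤ m := by
        by_contra h
        have hm0' : m = 0 := by omega
        rw [hm0', hm0, pvXval_zero K _ 1 (by omega)] at hc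
        omega
      have hstop : ¬ (pvMval K (Nat.digits K X) (m + 1)
          < pvXval K (Nat.digits K X) (m + 1) / K) := by
        rw [pvXval_div K (Nat.digits K X) (m + 1) hK1 hDlt (by omega)]
        apply not_lt.mpr
        apply le_of_lt
        calc pvXval K (Nat.digits K X) (m + 2) < K ^ ((Nat.digits K X).length - (m + 2)) :=
              pvXval_lt K hK1 (Nat.digits K X) hDlt (m + 2)
          _ ≤ K ^ m := Nat.pow_le_pow_right (by omega) (by omega)
          _ ≤ pvMval K (Nat.digits K X) (m + 1) :=
              pvMval_ge K (Nat.digits K X) hne hhead (m + 1) (by omega) (by omega)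
      have hguard' : ∀ j, 0 ≤ j → j < m + 1 →
          pvMval K (Nat.digits K X) j < pvXval K (Nat.digits K X) j / K := by
        intro j _ hj
        by_cases hjm : j = m
        · subst hjm
          rwa [pvXval_div K (Nat.digits K X) j hK1 hDlt (by omega)]
        · exact hguard j (by omega)
      have hrun := pvALoop_run K (Nat.digits K X) hK1 hDlt (X + 1) 0 (m + 1) (by omega)
        (by omega) (by omega) hguard' hstop
      rw [hm0, hx0] at hrun
      simp only [is_k_mirror, PySem.Int.mod_natCast, Int.natAbs_natCast]
      rw [if_neg (by exact_mod_cast hmod)]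
      simp only [Nat.cast_zero] at hrun
      simp only [hrun]
      rw [hB]
      simp only [PySem.Int.floordiv_natCast]
      rw [pvXval_div K (Nat.digits K X) (m + 1) hK1 hDlt (by omega)]
      have hup1 : pvXval K (Nat.digits K X) (m + 1) < pvMval K (Nat.digits K X) (m + 1) := by
        calc pvXval K (Nat.digits K X) (m + 1) < K ^ ((Nat.digits K X).length - (m + 1)) :=
              pvXval_lt K hK1 (Nat.digits K X) hDlt (m + 1)
          _ = K ^ m := by congr 1; omega
          _ ≤ pvMval K (Nat.digits K X) (m + 1) :=
              pvMval_ge K (Nat.digits K X) hne hhead (m + 1) (by omega) (by omega)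
      have hup2 : pvXval K (Nat.digits K X) (m + 2) < pvMval K (Nat.digits K X) (m + 1) := by
        calc pvXval K (Nat.digits K X) (m + 2) < K ^ ((Nat.digits K X).length - (m + 2)) :=
              pvXval_lt K hK1 (Nat.digits K X) hDlt (m + 2)
          _ ≤ K ^ m := Nat.pow_le_pow_right (by omega) (by omega)
          _ ≤ pvMval K (Nat.digits K X) (m + 1) :=
              pvMval_ge K (Nat.digits K X) hne hhead (m + 1) (by omega) (by omega)
      have hpal : Nat.digits K X ≠ (Nat.digits K X).reverse := by
        intro h
        have := (pvPal_odd (Nat.digits K X) m hodd).mp h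
        have heq : pvMval K (Nat.digits K X) m = pvXval K (Nat.digits K X) (m + 1) := by
          unfold pvMval pvXval
          rw [this]
        omega
      simp [Nat.cast_inj (R := Int), ne_of_gt hup1, ne_of_gt hup2, hpal]
    · -- stop right at m; result decided by the middle comparison
      have hstop : ¬ (pvMval K (Nat.digits K X) m < pvXval K (Nat.digits K X) m / K) := by
        rwa [pvXval_div K (Nat.digits K X) m hK1 hDlt (by omega)]
      have hrun := pvALoop_run K (Nat.digits K X) hK1 hDlt (X + 1) 0 m (by omega) (by omega)
        (by omega) (fun j _ hj => hguard j (by omega)) hstop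
      rw [hm0, hx0] at hrun
      simp only [is_k_mirror, PySem.Int.mod_natCast, Int.natAbs_natCast]
      rw [if_neg (by exact_mod_cast hmod)]
      simp only [Nat.cast_zero] at hrun
      simp only [hrun]
      rw [hB]
      simp only [PySem.Int.floordiv_natCast]
      rw [pvXval_div K (Nat.digits K X) m hK1 hDlt (by omega)]
      have hne1 : pvMval K (Nat.digits K X) m ≠ pvXval K (Nat.digits K X) m := by
        apply ne_of_lt
        calc pvMval K (Nat.digits K X) m < K ^ m :=
              pvMval_lt K hK1 (Nat.digits K X) hDlt m (by omega)
          _ = K ^ ((Nat.digits K X).length - m - 1) := by congr 1; omega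
          _ ≤ pvXval K (Nat.digits K X) m :=
              pvXval_ge K (Nat.digits K X) hne hlast m (by omega)
      have hd1 : decide (((pvMval K (Nat.digits K X) m : Nat) : Int)
          = ((pvXval K (Nat.digits K X) m : Nat) : Int)) = false := by
        simp [hne1]
      rw [hd1, Bool.false_or]
      apply decide_eq_decide.mpr
      rw [Nat.cast_inj (R := Int)]
      unfold pvMval pvXval
      rw [pvOfDigits_inj_iff K hK1 _ _ (hmemTake m) (hmemDrop (m + 1)) (hgTake m) (hgDrop (m + 1)),
        pvPal_odd (Nat.digits K X) m hodd]

theorem is_k_mirror_spec : Claim_equal_is_k_mirror := by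
  intro x k _ hpre
  unfold Spec_is_k_mirror
  by_cases hmod : PySem.Int.mod x k = 0
  · simp [is_k_mirror, is_k_mirror_alt, hmod]
  rcases hpre with hpos | ⟨hkneg, hxnn⟩
  case neg.inr =>
    -- k ≤ -1 and 0 ≤ x: A returns false whenever x % k ≠ 0, and B's `k < 0` guard fires
    have hx0 : 0 < x := by
      rcases eq_or_lt_of_le hxnn with h | h
      · exact absurd ((PySem.Int.mod_eq_zero_iff_dvd 0 k).mpr (dvd_zero k))
          (h ▸ hmod)
      · exact h
    have hbounds := PySem.Int.mod_neg_bounds (a := x) (b := k) (by omega)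
    have hq := PySem.Int.floordiv_mul_add_mod x k
    have hqneg : PySem.Int.floordiv x k < 0 := by
      by_contra h
      rw [not_lt] at h
      have : PySem.Int.floordiv x k * k ≤ 0 :=
        mul_nonpos_of_nonneg_of_nonpos h (by omega)
      omega
    simp only [is_k_mirror, is_k_mirror_alt]
    rw [if_neg hmod, if_pos (Or.inr (Or.inr (by omega)))]
    have hA : pvALoop k (x.natAbs + 1) 0 x = (0, x) := by
      simp only [pvALoop]
      rw [if_neg (by omega)]
    rw [hA]
    simp [(ne_of_gt hx0).symm, (ne_of_lt hqneg).symm]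
  case neg.inl =>
    have hpos : (1 : Int) ≤ k := hpos
    have hk0 : 0 < k := by omega
    have hk2 : 2 ≤ k := by
      by_contra h
      have hk1 : k = 1 := by omega
      rw [hk1, PySem.Int.mod_eq_emod_of_pos (by omega), Int.emod_one] at hmod
      exact hmod rfl
    by_cases hx : 0 < x
    · obtain ⟨X, hX⟩ : ∃ X : Nat, x = (X : Int) := ⟨x.toNat, (Int.toNat_of_nonneg (by omega)).symm⟩
      obtain ⟨K, hKc⟩ : ∃ K : Nat, k = (K : Int) := ⟨k.toNat, (Int.toNat_of_nonneg (by omega)).symm⟩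
      subst hX hKc
      have hXpos : 0 < X := by exact_mod_cast hx
      have hKge : 2 ≤ K := by exact_mod_cast hk2
      have hmodN : X % K ≠ 0 := by
        intro h
        apply hmod
        rw [PySem.Int.mod_natCast, h, Nat.cast_zero]
      exact pvMain_pos K X hKge hXpos hmodN
    · have hx0 : x ≠ 0 := by
        intro h
        rw [h, PySem.Int.mod_eq_emod_of_pos (by omega), Int.zero_emod] at hmod
        exact hmod rfl
      have hxneg : x < 0 := by omega
      have hdivneg : PySem.Int.floordiv x k < 0 := by
        rw [PySem.Int.floordiv_eq_ediv_of_pos (by omega)]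
        exact Int.ediv_neg_of_neg_of_pos hxneg hk0
      simp only [is_k_mirror, is_k_mirror_alt]
      rw [if_neg hmod, if_pos (Or.inr (Or.inl hxneg))]
      have hA : pvALoop k (x.natAbs + 1) 0 x = (0, x) := by
        simp only [pvALoop]
        rw [if_neg (by omega)]
      rw [hA]
      simp [Ne.symm hx0, (ne_of_lt hdivneg).symm]
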